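-- pv_equiv track=rewrite | github.com/daniel-reich/ubiquitous-fiesta | 26P2iwW5WfwPGJyWE_14.py | possibly_perfect
-- ===== SOURCE A (Python) =====
-- def possibly_perfect(key, answers):
--   newKey = []
--   newAnswers = []
--   for i, v in enumerate(key):
--     if v != '_':
--       newKey.append(key[i])
--       newAnswers.append(answers[i])
--   diff = [v for i, v in enumerate(newKey) if newKey[i] != newAnswers[i]]
--   same = [v for i, v in enumerate(newKey) if newKey[i] == newAnswers[i]]
--   return len(diff) == 0 or len(same) == 0
-- ===== SOURCE B (Python) =====
-- def possibly_perfect(key, answers):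
--   outcomes = {answers[i] == v for i, v in enumerate(key) if v != '_'}
--   return len(outcomes) <= 1
-- ===== Notes on version B (the rewrite author's own statement) =====
-- stated objective: simpler
-- what changed: Instead of partitioning into two lists and testing emptiness, B collects the set of distinct match outcomes {answers[i]==v} over the kept positions and returns whether its cardinality is at most 1.
import Mathlib
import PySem

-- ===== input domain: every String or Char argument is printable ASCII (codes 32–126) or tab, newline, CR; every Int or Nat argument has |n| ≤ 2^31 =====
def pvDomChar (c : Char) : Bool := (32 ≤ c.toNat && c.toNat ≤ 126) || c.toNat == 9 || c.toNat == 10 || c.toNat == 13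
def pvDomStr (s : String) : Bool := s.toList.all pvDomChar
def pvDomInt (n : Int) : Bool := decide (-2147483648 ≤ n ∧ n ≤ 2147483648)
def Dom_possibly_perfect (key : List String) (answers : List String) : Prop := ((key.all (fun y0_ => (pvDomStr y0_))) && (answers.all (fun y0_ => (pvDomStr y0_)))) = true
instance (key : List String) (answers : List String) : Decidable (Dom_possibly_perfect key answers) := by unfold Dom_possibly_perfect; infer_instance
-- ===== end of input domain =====

-- B replaces A's two-list partition + emptiness test by collecting the SET of distinct
-- match outcomes over kept positions and testing its cardinality ≤ 1; objective: simpler.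

-- ===== PORT A =====
def possibly_perfect (key : List String) (answers : List String) : Bool :=
  let st := (PySem.List.enumerate key).foldl
    (fun (st : List String × List String) iv =>
      if iv.2 != "_" then
        (st.1 ++ [PySem.List.pyGetD key iv.1 ""], st.2 ++ [PySem.List.pyGetD answers iv.1 ""])
      else st) ([], [])
  let newKey := st.1
  let newAnswers := st.2
  let diff := ((PySem.List.enumerate newKey).filter
      (fun iv => PySem.List.pyGetD newKey iv.1 "" != PySem.List.pyGetD newAnswers iv.1 "")).map (·.2)
  let same := ((PySem.List.enumerate newKey).filter
      (fun iv => PySem.List.pyGetD newKey iv.1 "" == PySem.List.pyGetD newAnswers iv.1 "")).map (·.2)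
  (diff.length == 0) || (same.length == 0)

-- ===== PORT B =====
def possibly_perfect_alt (key : List String) (answers : List String) : Bool :=
  let outcomes : PySem.Set Bool := (PySem.List.enumerate key).foldl
    (fun (s : PySem.Set Bool) iv =>
      if iv.2 != "_" then PySem.Set.add s (PySem.List.pyGetD answers iv.1 "" == iv.2) else s)
    PySem.Set.empty
  decide (PySem.Set.len outcomes ≤ 1)

-- ===== PRECONDITION & SPEC =====
-- Pre_ excludes exactly the inputs on which Python A raises IndexError:
-- some kept index (key[i] ≠ '_') is out of range for answers (B raises there too).
def Pre_possibly_perfect (key : List String) (answers : List String) : Prop :=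
  ∀ i : Nat, i < key.length → key.getD i "" ≠ "_" → i < answers.length
instance (key : List String) (answers : List String) : Decidable (Pre_possibly_perfect key answers) := by unfold Pre_possibly_perfect; infer_instance
def pvWitness_possibly_perfect : List String × List String := (["a", "_", "b"], ["a", "x", "c"])

def Spec_possibly_perfect (key : List String) (answers : List String) (out : Bool) : Prop := out = possibly_perfect_alt key answers
instance (key : List String) (answers : List String) (out : Bool) : Decidable (Spec_possibly_perfect key answers out) := by unfold Spec_possibly_perfect; infer_instance

-- ===== CLAIM (what is proved, stated in full; the proofs are below) =====
def Claim_equal_possibly_perfect : Prop := ∀ (key : List String) (answers : List String), Dom_possibly_perfect key answers → Pre_possibly_perfect key answers → Spec_possibly_perfect key answers (possibly_perfect key answers)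

-- ===== LEMMAS AND PROOFS =====

-- the kept (index, key-letter) pairs, common to both reductions
def pvKept (key : List String) : List (Int × String) :=
  (PySem.List.enumerate key).filter (fun iv => !(iv.2 == "_"))

-- A's building loop, generically
lemma pvFoldA (l : List (Int × String)) (f g : Int × String → String)
    (nk na : List String) :
    l.foldl (fun (st : List String × List String) iv =>
        if iv.2 != "_" then (st.1 ++ [f iv], st.2 ++ [g iv]) else st) (nk, na)
    = (nk ++ (l.filter (fun iv => !(iv.2 == "_"))).map f,
       na ++ (l.filter (fun iv => !(iv.2 == "_"))).map g) := by
  induction l generalizing nk na with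
  | nil => simp
  | cons x xs ih =>
    by_cases hx : x.2 = "_"
    · rw [List.foldl_cons, if_neg (by simp [hx]), List.filter_cons_of_neg (by simp [hx]), ih]
    · rw [List.foldl_cons, if_pos (by simp [hx]), List.filter_cons_of_pos (by simp [hx]), ih]
      simp

-- B's conditional set-building loop, generically
lemma pvFoldB (l : List (Int × String)) (f : Int × String → Bool) (s : PySem.Set Bool) :
    l.foldl (fun (s : PySem.Set Bool) iv =>
        if iv.2 != "_" then PySem.Set.add s (f iv) else s) s
    = PySem.Set.update s ((l.filter (fun iv => !(iv.2 == "_"))).map f) := by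
  induction l generalizing s with
  | nil => simp [PySem.Set.update]
  | cons x xs ih =>
    by_cases hx : x.2 = "_"
    · rw [List.foldl_cons, if_neg (by simp [hx]), List.filter_cons_of_neg (by simp [hx]), ih]
    · rw [List.foldl_cons, if_pos (by simp [hx]), List.filter_cons_of_pos (by simp [hx]), ih]
      simp [PySem.Set.update]

-- on members of enumerate, indexing back into the list returns the element itself
lemma pvGet_enumerate_mem (xs : List String) (iv : Int × String)
    (h : iv ∈ PySem.List.enumerate xs) :
    PySem.List.pyGetD xs iv.1 "" = iv.2 := by
  rw [PySem.List.mem_enumerate_iff] at h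
  obtain ⟨k, hk, rfl⟩ := h
  simp [PySem.List.pyGetD_natCast, List.getD_eq_getElem?_getD, hk]

-- the self-indexing comprehension filter, turned into a zip filter
lemma pvCountAux (nk na : List String) (p : String → String → Bool) (s : Nat)
    (h : s + nk.length ≤ na.length) :
    ((PySem.List.enumerate nk s).filter
        (fun iv => p iv.2 (PySem.List.pyGetD na iv.1 ""))).length
    = ((nk.zip (na.drop s)).filter (fun q => p q.1 q.2)).length := by
  induction nk generalizing s with
  | nil => simp [PySem.List.enumerate_nil]
  | cons x xs ih =>
    have hs : s < na.length := by simp at h; omega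
    have hdrop : na.drop s = na[s] :: na.drop (s + 1) :=
      (List.drop_eq_getElem_cons hs)
    have hget : PySem.List.pyGetD na (s : Int) "" = na[s] := by
      simp [PySem.List.pyGetD_natCast, List.getD_eq_getElem?_getD, hs]
    have htail : ((PySem.List.enumerate xs ((s : Int) + 1)).filter
          (fun iv => p iv.2 (PySem.List.pyGetD na iv.1 ""))).length
        = ((xs.zip (na.drop (s + 1))).filter (fun q => p q.1 q.2)).length := by
      have := ih (s + 1) (by simp at h ⊢; omega)
      rwa [show (((s + 1 : Nat)) : Int) = (s : Int) + 1 by push_cast; ring] at this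
    rw [PySem.List.enumerate_cons, hdrop]
    simp only [List.zip_cons_cons, List.filter_cons, hget]
    by_cases hp : p x na[s] = true <;> simp [hp, htail]

lemma pvBeqComm (a b : String) : (a == b) = (b == a) := by
  by_cases h : a = b
  · simp [h]
  · simp [h, Ne.symm h]

-- filter-empty ↔ all-negated
lemma pvLenZero {α : Type} (l : List α) (p : α → Bool) :
    ((l.filter p).length == 0) = l.all (fun iv => !(p iv)) := by
  induction l with
  | nil => simp
  | cons x xs ih =>
    by_cases hp : p x = true <;> simp [hp, ih]

-- a nodup list of booleans has at most one element iff it does not contain both values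
lemma pvNodupBoolLen (l : List Bool) (h : l.Nodup) :
    (l.length ≤ 1) ↔ ¬(true ∈ l ∧ false ∈ l) := by
  rcases l with _ | ⟨a, _ | ⟨b, t⟩⟩
  · simp
  · cases a <;> simp
  · simp only [List.nodup_cons, List.mem_cons] at h
    cases a <;> cases b <;> simp_all

lemma pvAllId (bs : List Bool) : bs.all (fun b => b) = !(decide (false ∈ bs)) := by
  induction bs with
  | nil => simp
  | cons x xs ih => cases x <;> simp [ih]

lemma pvAllNot (bs : List Bool) : bs.all (fun b => !b) = !(decide (true ∈ bs)) := by
  induction bs with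
  | nil => simp
  | cons x xs ih => cases x <;> simp [ih]

-- cardinality-≤-1 of the outcome set equals the all-same-or-all-different disjunction
lemma pvSetBool (bs : List Bool) :
    decide (PySem.Set.len (PySem.Set.ofList bs) ≤ 1)
      = (bs.all (fun b => b) || bs.all (fun b => !b)) := by
  have hiff := pvNodupBoolLen _ (PySem.Set.nodup_ofList bs)
  have hmem : ∀ b : Bool, b ∈ PySem.Set.ofList bs ↔ b ∈ bs :=
    fun b => PySem.Set.mem_ofList ..
  rw [pvAllId, pvAllNot]
  by_cases ht : true ∈ bs <;> by_cases hf : false ∈ bs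
  · have h2 : ¬ ((PySem.Set.ofList bs : List Bool).length ≤ 1) :=
      fun h => (hiff.mp h) ⟨(hmem true).mpr ht, (hmem false).mpr hf⟩
    simp [ht, hf, PySem.Set.len, h2]
  · have h2 : ((PySem.Set.ofList bs : List Bool).length ≤ 1) :=
      hiff.mpr (by simp [hmem, hf])
    simp [ht, hf, PySem.Set.len, h2]
  · have h2 : ((PySem.Set.ofList bs : List Bool).length ≤ 1) :=
      hiff.mpr (by simp [hmem, ht])
    simp [ht, hf, PySem.Set.len, h2]
  · have h2 : ((PySem.Set.ofList bs : List Bool).length ≤ 1) :=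
      hiff.mpr (by simp [hmem, ht])
    simp [ht, hf, PySem.Set.len, h2]

-- A reduced to canonical form: all kept positions match, or none does
lemma pvA_canon (key answers : List String) :
    possibly_perfect key answers
      = ((pvKept key).all (fun iv => PySem.List.pyGetD answers iv.1 "" == iv.2)
         || (pvKept key).all (fun iv => !(PySem.List.pyGetD answers iv.1 "" == iv.2))) := by
  unfold possibly_perfect
  rw [pvFoldA]
  simp only [List.nil_append]
  have hmapK : ((PySem.List.enumerate key).filter (fun iv => !(iv.2 == "_"))).map
        (fun iv => PySem.List.pyGetD key iv.1 "")
      = ((PySem.List.enumerate key).filter (fun iv => !(iv.2 == "_"))).map (·.2) := by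
    apply List.map_congr_left
    intro iv hiv
    exact pvGet_enumerate_mem key iv (List.mem_of_mem_filter hiv)
  rw [hmapK]
  rw [show (PySem.List.enumerate key).filter (fun iv => !(iv.2 == "_")) = pvKept key from rfl]
  set M := pvKept key with hM
  set nk : List String := M.map (·.2) with hnk
  set na : List String := M.map (fun iv => PySem.List.pyGetD answers iv.1 "") with hna
  have h1 : (PySem.List.enumerate nk).filter
        (fun iv => PySem.List.pyGetD nk iv.1 "" != PySem.List.pyGetD na iv.1 "")
      = (PySem.List.enumerate nk).filter (fun iv => iv.2 != PySem.List.pyGetD na iv.1 "") := by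
    apply List.filter_congr
    intro iv hiv
    rw [pvGet_enumerate_mem nk iv hiv]
  have h2 : (PySem.List.enumerate nk).filter
        (fun iv => PySem.List.pyGetD nk iv.1 "" == PySem.List.pyGetD na iv.1 "")
      = (PySem.List.enumerate nk).filter (fun iv => iv.2 == PySem.List.pyGetD na iv.1 "") := by
    apply List.filter_congr
    intro iv hiv
    rw [pvGet_enumerate_mem nk iv hiv]
  rw [h1, h2]
  have hlen : (0 : Nat) + nk.length ≤ na.length := by simp [hnk, hna]
  have hd := pvCountAux nk na (fun a b => a != b) 0 hlen
  have hs := pvCountAux nk na (fun a b => a == b) 0 hlen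
  simp only [Nat.cast_zero, List.drop_zero] at hd hs
  simp only [List.length_map]
  rw [hd, hs, pvLenZero, pvLenZero]
  have hzip : nk.zip na = M.map (fun iv => (iv.2, PySem.List.pyGetD answers iv.1 "")) := by
    rw [hnk, hna, List.zip_map']
  rw [hzip]
  have e1 : ∀ iv : Int × String,
      (!((iv.2, PySem.List.pyGetD answers iv.1 "").1 != (iv.2, PySem.List.pyGetD answers iv.1 "").2))
      = (PySem.List.pyGetD answers iv.1 "" == iv.2) := by
    intro iv
    simp only [bne, Bool.not_not]
    exact pvBeqComm ..
  have e2 : ∀ iv : Int × String,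
      (!((iv.2, PySem.List.pyGetD answers iv.1 "").1 == (iv.2, PySem.List.pyGetD answers iv.1 "").2))
      = (!(PySem.List.pyGetD answers iv.1 "" == iv.2)) := by
    intro iv
    rw [pvBeqComm]
  simp only [List.all_map, Function.comp_def, e1, e2]

-- B reduced to the same canonical form
lemma pvB_canon (key answers : List String) :
    possibly_perfect_alt key answers
      = ((pvKept key).all (fun iv => PySem.List.pyGetD answers iv.1 "" == iv.2)
         || (pvKept key).all (fun iv => !(PySem.List.pyGetD answers iv.1 "" == iv.2))) := by
  unfold possibly_perfect_alt
  rw [pvFoldB]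
  have hupd : ∀ (xs : List Bool),
      PySem.Set.update (PySem.Set.empty : PySem.Set Bool) xs = PySem.Set.ofList xs := by
    intro xs; rfl
  rw [hupd, pvSetBool,
    show (PySem.List.enumerate key).filter (fun iv => !(iv.2 == "_")) = pvKept key from rfl]
  simp only [List.all_map, Function.comp_def]

-- ===== VERDICT (by name: the statement is the Claim_ definition above) =====
theorem possibly_perfect_spec : Claim_equal_possibly_perfect := by
  intro key answers _ _
  unfold Spec_possibly_perfect
  rw [pvA_canon key answers, pvB_canon key answers]
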